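-- pv_equiv track=rewrite | github.com/HamiGames/Lucid | infrastructure/containers/inject_dockerfile_x_files_skeleton.py | build_runtime_copy_block_lines
-- ===== SOURCE A (Python) =====
-- MARK_RUNTIME_COPY_BEGIN = "# LUCID_RUNTIME_COPY_FROM_BUILD_BEGIN"
--
-- MARK_RUNTIME_COPY_END = "# LUCID_RUNTIME_COPY_FROM_BUILD_END"
--
-- _BLOCKED_TOP_LEVEL_BUILD_DIRS = frozenset({"host"})
--
-- def is_blocked_top_level_build_dir_path(d: str) -> bool:
--     """
--     True for ``./host`` / ``./host/...`` under WORKDIR ``/build`` (and ``/build/host/...`` tails).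
--     Must not emit skeleton mkdir, runtime ``/build/host/…``, or per-file COPY sync for that tree.
--     """
--     s = d.strip().replace("\\", "/")
--     if s.startswith("./"):
--         s = s[2:]
--     elif s.startswith("/build/"):
--         s = s[len("/build/") :]
--     s = s.rstrip("/")
--     if not s or s == ".":
--         return False
--     return s.split("/")[0] in _BLOCKED_TOP_LEVEL_BUILD_DIRS
--
-- def normalize_rdp_segments_in_rel(rel: str) -> str:
--     """Path segment ``RDP`` → ``rdp`` (repo convention; matches skeleton / sync)."""
--     if not rel or rel == ".":
--         return rel
--     return "/".join("rdp" if p == "RDP" else p for p in rel.split("/"))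
--
-- def prune_dirs_for_runtime_copy(dirs: set[str]) -> list[str]:
--     """
--     Drop ``./child`` when ``./parent`` is also in the set (parent COPY covers the subtree).
--     """
--     candidates = [d for d in dirs if d != "."]
--     if not candidates:
--         return []
--     candidates_sorted = sorted(candidates, key=lambda s: (s.count("/"), len(s)))
--     out: list[str] = []
--     for d in candidates_sorted:
--         dd = d.rstrip("/")
--         is_child = False
--         for p in candidates:
--             if p == d:
--                 continue
--             pp = p.rstrip("/")
--             if dd != pp and dd.startswith(pp + "/"):
--                 is_child = True
--                 break
--         if not is_child:
--             out.append(d)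
--     return sorted(out, key=lambda s: (s.count("/"), s))
--
-- def build_runtime_copy_block_lines(dirs: list[str], builder_stage: str) -> list[str]:
--     """
--     One ``COPY --from=<stage> --chown=65532:65532 ... /build/<rel>/ /app/<rel>/`` per pruned skeleton dir.
--     ``dirs`` uses the same ``./...`` paths as LUCID_X_FILES_SKELETON (WORKDIR /build).
--     Matches the common distroless pattern (literal ``65532:65532``, no ARG placeholders).
--     """
--     pruned = prune_dirs_for_runtime_copy(set(dirs))
--     lines: list[str] = [
--         MARK_RUNTIME_COPY_BEGIN,
--         "# Generated: same directory set as LUCID_X_FILES_SKELETON (./ under WORKDIR /build).",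
--     ]
--     seen_rel: set[str] = set()
--     for d in pruned:
--         if is_blocked_top_level_build_dir_path(d):
--             continue
--         rel = d[2:].rstrip("/") if d.startswith("./") else d.lstrip("/").rstrip("/")
--         rel = normalize_rdp_segments_in_rel(rel)
--         if not rel or rel in seen_rel:
--             continue
--         seen_rel.add(rel)
--         lines.append(
--             f"COPY --from={builder_stage} --chown=65532:65532 /build/{rel}/ /app/{rel}/"
--         )
--     lines.append(MARK_RUNTIME_COPY_END)
--     lines.append("")
--     return lines
-- ===== SOURCE B (Python) =====
-- MARK_RUNTIME_COPY_BEGIN = "# LUCID_RUNTIME_COPY_FROM_BUILD_BEGIN"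
-- MARK_RUNTIME_COPY_END = "# LUCID_RUNTIME_COPY_FROM_BUILD_END"
-- _BLOCKED_TOP_LEVEL_BUILD_DIRS = frozenset({"host"})
--
--
-- def is_blocked_top_level_build_dir_path(d: str) -> bool:
--     # same leaf utility as the original module
--     s = d.strip().replace("\\", "/")
--     if s.startswith("./"):
--         s = s[2:]
--     elif s.startswith("/build/"):
--         s = s[len("/build/"):]
--     s = s.rstrip("/")
--     if not s or s == ".":
--         return False
--     return s.split("/")[0] in _BLOCKED_TOP_LEVEL_BUILD_DIRS
--
--
-- def normalize_rdp_segments_in_rel(rel: str) -> str: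
--     if not rel or rel == ".":
--         return rel
--     return "/".join("rdp" if p == "RDP" else p for p in rel.split("/"))
--
--
-- def _rel_of(d: str) -> str:
--     rel = d[2:].rstrip("/") if d.startswith("./") else d.lstrip("/").rstrip("/")
--     return normalize_rdp_segments_in_rel(rel)
--
--
-- def build_runtime_copy_block_lines(dirs: list[str], builder_stage: str) -> list[str]:
--     candidates = [d for d in set(dirs) if d != "."]
--     # O(total length): one hash set of rstripped dirs, each dir probes its
--     # ancestor '/'-prefixes by set lookup instead of scanning all other dirs.
--     stripped = {p.rstrip("/") for p in candidates}
--
--     def is_child(d: str) -> bool: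
--         dd = d.rstrip("/")
--         return any(dd[i] == "/" and dd[:i] in stripped for i in range(len(dd)))
--
--     kept = sorted((d for d in candidates if not is_child(d)),
--                   key=lambda s: (s.count("/"), s))
--     rels = [_rel_of(d) for d in kept if not is_blocked_top_level_build_dir_path(d)]
--     lines = [MARK_RUNTIME_COPY_BEGIN,
--              "# Generated: same directory set as LUCID_X_FILES_SKELETON (./ under WORKDIR /build)."]
--     lines += [f"COPY --from={builder_stage} --chown=65532:65532 /build/{r}/ /app/{r}/"
--               for r in dict.fromkeys(rels) if r]
--     lines.append(MARK_RUNTIME_COPY_END)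
--     lines.append("")
--     return lines
-- ===== Notes on version B (the rewrite author's own statement) =====
-- stated objective: faster
-- what changed: A's prune scans all other dirs per dir (O(n^2*L) string prefix tests) and dedups COPY lines with an imperative seen-set loop; B builds one hash set of rstripped dirs and tests each dir's '/'-ancestor prefixes by set lookup (O(n*L)), sorts once with the final key instead of twice, and dedups rels with dict.fromkeys.
import Mathlib
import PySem

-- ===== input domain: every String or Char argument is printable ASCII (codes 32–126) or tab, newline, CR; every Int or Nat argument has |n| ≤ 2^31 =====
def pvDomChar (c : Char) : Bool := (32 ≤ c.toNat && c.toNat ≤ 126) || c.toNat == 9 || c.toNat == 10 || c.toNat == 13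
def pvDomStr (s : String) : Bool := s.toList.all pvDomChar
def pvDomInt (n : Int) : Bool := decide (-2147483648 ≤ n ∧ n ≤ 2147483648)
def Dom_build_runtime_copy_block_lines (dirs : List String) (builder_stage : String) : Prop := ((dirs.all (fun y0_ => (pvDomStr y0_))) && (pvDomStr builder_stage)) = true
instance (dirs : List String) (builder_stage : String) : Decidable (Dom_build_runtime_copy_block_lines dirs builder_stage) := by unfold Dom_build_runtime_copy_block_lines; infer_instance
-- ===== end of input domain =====

-- B replaces A's quadratic all-pairs parent scan by one hash set of rstripped dirs probed
-- at each '/'-ancestor prefix, and the seen-set emission loop by a dict.fromkeys dedup.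

-- ===== PORT A =====
-- shared leaf utilities (character-identical in Source A and Source B)

-- exact port of Python s.rstrip("/"): drop trailing '/' characters
def pvRstripSlash (s : String) : String :=
  String.ofList ((s.toList.reverse.dropWhile (fun c => c == '/')).reverse)

-- exact port of Python s.lstrip("/"): drop leading '/' characters
def pvLstripSlash (s : String) : String :=
  String.ofList (s.toList.dropWhile (fun c => c == '/'))

def pvIsBlocked (d : String) : Bool :=
  let s0 := PySem.Str.replace (PySem.Str.strip d) "\\" "/"
  let s1 := if PySem.Str.startswith s0 "./" then PySem.Str.slice s0 (some 2) none
            else if PySem.Str.startswith s0 "/build/" then PySem.Str.slice s0 (some 7) none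
            else s0
  let s := pvRstripSlash s1
  if s == "" || s == "." then false
  else
    -- s.split("/")[0] in {"host"}; split? with sep "/" ≠ "" always returns some nonempty list
    match PySem.Str.split? s "/" with
    | some (h :: _) => h == "host"
    | _ => false

def pvNormalizeRdp (rel : String) : String :=
  if rel == "" || rel == "." then rel
  else PySem.Str.join "/"
    (((PySem.Str.split? rel "/").getD []).map (fun p => if p == "RDP" then "rdp" else p))

def pvRelOf (d : String) : String :=
  let rel := if PySem.Str.startswith d "./" then pvRstripSlash (PySem.Str.slice d (some 2) none)
             else pvRstripSlash (pvLstripSlash d)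
  pvNormalizeRdp rel

def pvFmt (builder_stage rel : String) : String :=
  "COPY --from=" ++ builder_stage ++ " --chown=65532:65532 /build/" ++ rel ++ "/ /app/" ++ rel ++ "/"

-- A's inner 'for p in candidates: … break' loop
def pvChildA (candidates : List String) (d : String) : Bool :=
  let dd := pvRstripSlash d
  candidates.any (fun p =>
    !(p == d) && (let pp := pvRstripSlash p; !(dd == pp) && PySem.Str.startswith dd (pp ++ "/")))

def pvPrune (dirs : PySem.Set String) : List String :=
  let candidates := dirs.filter (fun d => !(d == "."))
  if candidates.isEmpty then []
  else
    let candidates_sorted :=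
      PySem.List.sorted2 candidates (fun s => PySem.Str.count s "/") (fun s => PySem.Str.len s)
    let out := candidates_sorted.foldl
      (fun acc d => if pvChildA candidates d then acc else acc ++ [d]) []
    PySem.List.sorted2 out (fun s => PySem.Str.count s "/") (fun s => s)

def build_runtime_copy_block_lines (dirs : List String) (builder_stage : String) : List String :=
  let pruned := pvPrune (PySem.Set.ofList dirs)
  let st := pruned.foldl
    (fun (acc : List String × PySem.Set String) d =>
      if pvIsBlocked d then acc
      else
        let rel := pvRelOf d
        if rel == "" || acc.2.contains rel then acc
        else (acc.1 ++ [pvFmt builder_stage rel], acc.2.add rel))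
    (["# LUCID_RUNTIME_COPY_FROM_BUILD_BEGIN",
      "# Generated: same directory set as LUCID_X_FILES_SKELETON (./ under WORKDIR /build)."],
     PySem.Set.empty)
  st.1 ++ ["# LUCID_RUNTIME_COPY_FROM_BUILD_END", ""]

-- ===== PORT B =====
-- Source B's is_child: probe each '/'-ancestor prefix of dd in the stripped set
def pvChildB (stripped : PySem.Set String) (d : String) : Bool :=
  let dd := pvRstripSlash d
  (PySem.List.pyRange 0 (PySem.Str.len dd) 1).any (fun i =>
    (PySem.Str.pyGet? dd i == some '/') && stripped.contains (PySem.Str.slice dd none (some i)))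

def build_runtime_copy_block_lines_alt (dirs : List String) (builder_stage : String) : List String :=
  let candidates := (PySem.Set.ofList dirs).filter (fun d => !(d == "."))
  let stripped := PySem.Set.ofList (candidates.map pvRstripSlash)
  let kept := PySem.List.sorted2 (candidates.filter (fun d => !pvChildB stripped d))
      (fun s => PySem.Str.count s "/") (fun s => s)
  let rels := (kept.filter (fun d => !pvIsBlocked d)).map pvRelOf
  (["# LUCID_RUNTIME_COPY_FROM_BUILD_BEGIN",
    "# Generated: same directory set as LUCID_X_FILES_SKELETON (./ under WORKDIR /build)."]
   ++ ((PySem.List.dedup rels).filter (fun r => !(r == ""))).map (pvFmt builder_stage))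
  ++ ["# LUCID_RUNTIME_COPY_FROM_BUILD_END", ""]

-- ===== PRECONDITION & SPEC =====
def Spec_build_runtime_copy_block_lines (dirs : List String) (builder_stage : String) (out : List String) : Prop := out = build_runtime_copy_block_lines_alt dirs builder_stage
instance (dirs : List String) (builder_stage : String) (out : List String) : Decidable (Spec_build_runtime_copy_block_lines dirs builder_stage out) := by unfold Spec_build_runtime_copy_block_lines; infer_instance

-- ===== CLAIM (what is proved, stated in full; the proofs are below) =====
def Claim_equal_build_runtime_copy_block_lines : Prop := ∀ (dirs : List String) (builder_stage : String), Dom_build_runtime_copy_block_lines dirs builder_stage → Spec_build_runtime_copy_block_lines dirs builder_stage (build_runtime_copy_block_lines dirs builder_stage)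

-- ===== LEMMAS AND PROOFS =====

theorem pv_sorted2_eq_sorted_lex {α κ₁ κ₂ : Type} [LinearOrder κ₁] [LinearOrder κ₂]
    (xs : List α) (k1 : α → κ₁) (k2 : α → κ₂) :
    PySem.List.sorted2 xs k1 k2 = PySem.List.sorted xs (fun x => toLex (k1 x, k2 x)) := by
  rw [PySem.List.sorted_eq_foldl_insertBy]
  simp only [PySem.List.sorted2]
  congr 1
  funext acc x
  congr 1
  funext a b
  rcases lt_trichotomy (k1 a) (k1 b) with h | h | h
  · simp [Prod.Lex.toLex_lt_toLex, h]
  · simp [Prod.Lex.toLex_lt_toLex, h]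
  · have h1 : ¬ k1 a < k1 b := lt_asymm h
    have h2 : k1 a ≠ k1 b := ne_of_gt h
    simp [Prod.Lex.toLex_lt_toLex, h, h1, h2]

theorem pv_key_injective :
    Function.Injective (fun s : String => toLex (PySem.Str.count s "/", s)) := by
  intro x y h
  have := congrArg (fun t : Lex (ℕ × String) => (ofLex t).2) h
  simpa using this

theorem pv_prefix_slash_iff (x dd : List Char) :
    (x ++ ['/'] <+: dd) ↔ ∃ n : ℕ, n < dd.length ∧ dd[n]? = some '/' ∧ dd.take n = x := by
  constructor
  · intro h
    have hlen := h.length_le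
    simp only [List.length_append, List.length_cons, List.length_nil] at hlen
    refine ⟨x.length, by omega, ?_, ?_⟩
    · have := h.getElem (i := x.length) (by simp)
      simp only [List.getElem_append_right (le_refl x.length)] at this
      rw [List.getElem?_eq_getElem (by omega)]
      simp only [Nat.sub_self, List.getElem_cons_zero] at this
      exact congrArg some this.symm
    · have hx : x <+: dd := (List.prefix_append x ['/']).trans h
      exact (List.prefix_iff_eq_take.mp hx).symm
  · rintro ⟨n, hn, hget, htake⟩
    have : dd.take (n + 1) = x ++ ['/'] := by
      rw [List.take_add_one, htake, hget]
      rfl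
    exact this ▸ List.take_prefix (n + 1) dd

theorem pv_slice_take (s : String) (n : ℕ) :
    PySem.Str.slice s none (some (n : ℤ)) = String.ofList (s.toList.take n) := by
  simp only [PySem.Str.slice, PySem.Chars.slice_eq_listSlice]
  rw [PySem.List.slice_to _ (by positivity : (0:ℤ) ≤ (n:ℤ))]
  simp

theorem pv_child_eq (C : List String) (d : String) :
    pvChildA C d = pvChildB (PySem.Set.ofList (C.map pvRstripSlash)) d := by
  rw [Bool.eq_iff_iff]
  simp only [pvChildA, pvChildB, List.any_eq_true, Bool.and_eq_true, Bool.not_eq_true',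
    beq_eq_false_iff_ne, beq_iff_eq, PySem.Str.startswith_eq]
  constructor
  · rintro ⟨p, hp, hpd, hne, hsw⟩
    rw [PySem.Chars.startswith_iff, String.toList_append,
      (by decide : ("/" : String).toList = ['/'])] at hsw
    obtain ⟨n, hn, hget, htake⟩ := (pv_prefix_slash_iff _ _).mp hsw
    refine ⟨(n : ℤ), ?_, ?_, ?_⟩
    · rw [PySem.List.mem_pyRange_iff_of_pos (by norm_num)]
      refine ⟨by positivity, ?_, ⟨n, by ring⟩⟩
      simp only [PySem.Str.len]
      exact_mod_cast hn
    · rw [PySem.Str.pyGet?_natCast]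
      exact hget
    · rw [PySem.Set.contains_iff, PySem.Set.mem_ofList]
      refine List.mem_map.mpr ⟨p, hp, ?_⟩
      rw [pv_slice_take, htake, String.ofList_toList]
  · rintro ⟨i, hi, hget, hcont⟩
    rw [PySem.List.mem_pyRange_iff_of_pos (by norm_num)] at hi
    obtain ⟨hi0, hilen, -⟩ := hi
    set n := i.toNat with hn
    have hin : i = (n : ℤ) := (Int.toNat_of_nonneg hi0).symm
    rw [hin, PySem.Str.pyGet?_natCast] at hget
    have hilen2 : i < ((pvRstripSlash d).toList.length : ℤ) := hilen
    have hnlen : n < (pvRstripSlash d).toList.length := by omega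
    rw [PySem.Set.contains_iff, PySem.Set.mem_ofList] at hcont
    obtain ⟨p, hp, hps⟩ := List.mem_map.mp hcont
    rw [hin, pv_slice_take] at hps
    have hxl : (pvRstripSlash p).toList = (pvRstripSlash d).toList.take n := by
      rw [hps, String.toList_ofList]
    have hpre : (pvRstripSlash p).toList ++ ['/'] <+: (pvRstripSlash d).toList :=
      (pv_prefix_slash_iff _ _).mpr ⟨n, hnlen, hget, hxl.symm⟩
    have hlt : ((pvRstripSlash p).toList).length < ((pvRstripSlash d).toList).length := by
      rw [hxl, List.length_take]; omega
    refine ⟨p, hp, ?_, ?_, ?_⟩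
    · intro h; rw [h] at hlt; omega
    · intro h; rw [h] at hlt; omega
    · rw [PySem.Chars.startswith_iff, String.toList_append,
        (by decide : ("/" : String).toList = ['/'])]
      exact hpre

theorem pv_prune_eq (dirs : List String) :
    pvPrune (PySem.Set.ofList dirs) =
      (let candidates := (PySem.Set.ofList dirs).filter (fun d => !(d == "."))
       PySem.List.sorted2
         (candidates.filter (fun d => !pvChildB (PySem.Set.ofList (candidates.map pvRstripSlash)) d))
         (fun s => PySem.Str.count s "/") (fun s => s)) := by
  simp only [pvPrune]
  by_cases hC : ((PySem.Set.ofList dirs).filter (fun d => !(d == "."))).isEmpty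
  · rw [if_pos hC]
    rw [List.isEmpty_iff.mp hC]
    rfl
  · rw [if_neg hC]
    have hfun : (fun (acc : List String) d =>
        if pvChildA ((PySem.Set.ofList dirs).filter (fun d => !(d == "."))) d then acc
        else acc ++ [d]) =
        (fun acc d => if (!pvChildA ((PySem.Set.ofList dirs).filter (fun d => !(d == "."))) d)
          then acc ++ [d] else acc) := by
      funext acc d
      cases h : pvChildA ((PySem.Set.ofList dirs).filter (fun d => !(d == "."))) d <;> simp [h]
    rw [hfun, PySem.List.foldl_append_if_eq_filter, List.nil_append]
    rw [pv_sorted2_eq_sorted_lex, pv_sorted2_eq_sorted_lex, pv_sorted2_eq_sorted_lex]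
    apply PySem.List.sorted_eq_sorted_of_perm _ _ _ pv_key_injective
    simp only [← pv_child_eq]
    exact List.Perm.filter _ (PySem.List.sorted_perm _ _ _)

theorem pv_contains_add (s : PySem.Set String) (r x : String) :
    (s.add r).contains x = (s.contains x || x == r) := by
  rw [Bool.eq_iff_iff]
  simp [PySem.Set.mem_add, beq_iff_eq]

theorem pv_tail_loop (bs : String) (pr : List String) (lines : List String) (seen : PySem.Set String) :
    (pr.foldl
      (fun (acc : List String × PySem.Set String) d =>
        if pvIsBlocked d then acc
        else if pvRelOf d == "" || acc.2.contains (pvRelOf d) then acc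
        else (acc.1 ++ [pvFmt bs (pvRelOf d)], acc.2.add (pvRelOf d))) (lines, seen)).1 =
    lines ++ ((PySem.List.dedup ((pr.filter (fun d => !pvIsBlocked d)).map pvRelOf)).filter
        (fun r => !(r == "") && !(seen.contains r))).map (pvFmt bs) := by
  induction pr generalizing lines seen with
  | nil => simp [PySem.List.dedup, PySem.Set.ofList]
  | cons d pr ih =>
    rw [List.foldl_cons, List.filter_cons]
    by_cases hb : pvIsBlocked d
    · simp only [hb, if_true, Bool.not_true, Bool.false_eq_true, if_false]
      exact ih lines seen
    · simp only [hb, Bool.false_eq_true, if_false, Bool.not_false, if_true]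
      by_cases hq : (pvRelOf d == "" || seen.contains (pvRelOf d)) = true
      · rw [if_pos hq]
        rw [ih lines seen]
        have hqr : (!(pvRelOf d == "") && !(seen.contains (pvRelOf d))) = false := by
          have := hq
          simp only [Bool.or_eq_true] at this
          rcases this with h | h
          · rw [h, Bool.not_true, Bool.false_and]
          · rw [h, Bool.not_true, Bool.and_false]
        congr 1
        simp only [List.map_cons, PySem.List.dedup, PySem.Set.ofList_cons, List.filter_cons, hqr,
          Bool.false_eq_true, if_false, PySem.Set.discard, List.filter_filter]
        congr 1
        refine (List.filter_congr fun x _ => ?_).symm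
        by_cases hx : (x == pvRelOf d) = true
        · rw [eq_of_beq hx, hqr, Bool.false_and]
        · rw [Bool.eq_false_iff.mpr hx, Bool.not_false, Bool.and_true]
      · rw [if_neg hq]
        rw [ih (lines ++ [pvFmt bs (pvRelOf d)]) (seen.add (pvRelOf d))]
        have hqr : (!(pvRelOf d == "") && !(seen.contains (pvRelOf d))) = true := by
          simp only [Bool.or_eq_true, not_or] at hq
          rw [Bool.eq_false_iff.mpr hq.1, Bool.eq_false_iff.mpr hq.2]
          rfl
        simp only [List.map_cons, PySem.List.dedup, PySem.Set.ofList_cons, List.filter_cons, hqr,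
          if_true, PySem.Set.discard, List.filter_filter]
        rw [List.append_assoc, List.singleton_append]
        congr 3
        refine List.filter_congr fun x _ => ?_
        rw [pv_contains_add, Bool.not_or, ← Bool.and_assoc]

-- ===== VERDICT (by name: the statement is the Claim_ definition above) =====
theorem build_runtime_copy_block_lines_spec : Claim_equal_build_runtime_copy_block_lines := by
  intro dirs bs _
  unfold Spec_build_runtime_copy_block_lines build_runtime_copy_block_lines build_runtime_copy_block_lines_alt
  simp only [pv_prune_eq]
  simp only [pv_tail_loop]
  have hempty : (fun r => !(r == "") && !((PySem.Set.empty : PySem.Set String).contains r)) =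
      (fun r : String => !(r == "")) := by
    funext r
    simp [PySem.Set.empty, PySem.Set.contains]
  rw [hempty, List.append_assoc]
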